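-- pv_equiv track=rewrite | github.com/antiborder/japanese-learn-api | app/utils/utils.py | convert_romaji_to_hiragana
-- ===== SOURCE A (Python) =====
-- def convert_romaji_to_hiragana(romaji: str) -> str:
--     romaji_to_hiragana_map = {
--         'kya': 'きゃ', 'kyu': 'きゅ', 'kyo': 'きょ',
--         'sha': 'しゃ', 'shu': 'しゅ', 'sho': 'しょ',
--         'cha': 'ちゃ', 'chu': 'ちゅ', 'cho': 'ちょ',
--         'nya': 'にゃ', 'nyu': 'にゅ', 'nyo': 'にょ',
--         'hya': 'ひゃ', 'hyu': 'ひゅ', 'hyo': 'ひょ',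
--         'mya': 'みゃ', 'myu': 'みゅ', 'myo': 'みょ',
--         'rya': 'りゃ', 'ryu': 'りゅ', 'ryo': 'りょ',
--         'ba': 'ば', 'bi': 'び', 'bu': 'ぶ', 'be': 'べ', 'bo': 'ぼ',
--         'pa': 'ぱ', 'pi': 'ぴ', 'pu': 'ぷ', 'pe': 'ぺ', 'po': 'ぽ',
--         'va': 'ゔぁ', 'vi': 'ゔぃ', 'vu': 'ゔ', 've': 'ゔぇ', 'vo': 'ゔぉ',
--         'ka': 'か', 'ki': 'き', 'ku': 'く', 'ke': 'け', 'ko': 'こ',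
--         'sa': 'さ', 'shi': 'し', 'su': 'す', 'se': 'せ', 'so': 'そ',
--         'ta': 'た', 'chi': 'ち', 'tsu': 'つ', 'te': 'て', 'to': 'と',
--         'na': 'な', 'ni': 'に', 'nu': 'ぬ', 'ne': 'ね', 'no': 'の',
--         'ha': 'は', 'hi': 'ひ', 'fu': 'ふ', 'he': 'へ', 'ho': 'ほ',
--         'ma': 'ま', 'mi': 'み', 'mu': 'む', 'me': 'め', 'mo': 'も',
--         'ya': 'や', 'yu': 'ゆ', 'yo': 'よ',
--         'ra': 'ら', 'ri': 'り', 'ru': 'る', 're': 'れ', 'ro': 'ろ',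
--         'wa': 'わ', 'wo': 'を', 'n': 'ん',
--         'a': 'あ', 'i': 'い', 'u': 'う', 'e': 'え', 'o': 'お',
--     }
--
--     hiragana = romaji
--     for romaji_key, hiragana_value in romaji_to_hiragana_map.items():
--         hiragana = hiragana.replace(romaji_key, hiragana_value)
--
--     return hiragana
-- ===== SOURCE B (Python) =====
-- # Table kept as one compact "key:value" string parsed once; a single left-to-right
-- # scan emits, at each position, the first entry (in table order) matching there.
-- _TABLE = ('kya:きゃ kyu:きゅ kyo:きょ sha:しゃ shu:しゅ sho:しょ cha:ちゃ chu:ちゅ cho:ちょ '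
--           'nya:にゃ nyu:にゅ nyo:にょ hya:ひゃ hyu:ひゅ hyo:ひょ mya:みゃ myu:みゅ myo:みょ '
--           'rya:りゃ ryu:りゅ ryo:りょ ba:ば bi:び bu:ぶ be:べ bo:ぼ pa:ぱ pi:ぴ pu:ぷ pe:ぺ po:ぽ '
--           'va:ゔぁ vi:ゔぃ vu:ゔ ve:ゔぇ vo:ゔぉ ka:か ki:き ku:く ke:け ko:こ '
--           'sa:さ shi:し su:す se:せ so:そ ta:た chi:ち tsu:つ te:て to:と '
--           'na:な ni:に nu:ぬ ne:ね no:の ha:は hi:ひ fu:ふ he:へ ho:ほ '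
--           'ma:ま mi:み mu:む me:め mo:も ya:や yu:ゆ yo:よ ra:ら ri:り ru:る re:れ ro:ろ '
--           'wa:わ wo:を n:ん a:あ i:い u:う e:え o:お')
--
--
-- def convert_romaji_to_hiragana(romaji: str) -> str:
--     entries = [e.split(':') for e in _TABLE.split(' ')]
--     out = []
--     i = 0
--     n = len(romaji)
--     while i < n:
--         for key, val in entries:
--             if romaji.startswith(key, i):
--                 out.append(val)
--                 i += len(key)
--                 break
--         else:
--             out.append(romaji[i])
--             i += 1
--     return ''.join(out)
-- ===== Notes on version B (the rewrite author's own statement) =====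
-- stated objective: alternative
-- what changed: Replaces A's 82 sequential whole-string replace passes over a literal dict by one left-to-right scan that, at each position, emits the first matching entry of a table parsed once from a compact 'key:value'-pairs string.
-- intended difference: On strings containing the substring 'tsu', A's map order replaces 'su' (sa-row) before 'tsu' is ever tried, so A returns 'tす' for each 'tsu' occurrence, while B returns the intended つ; B's value is what the transliteration table itself specifies ('tsu': 'つ'). — e.g. on convert_romaji_to_hiragana("tsu"): A returns "tす", B returns "つ"
import Mathlib
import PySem

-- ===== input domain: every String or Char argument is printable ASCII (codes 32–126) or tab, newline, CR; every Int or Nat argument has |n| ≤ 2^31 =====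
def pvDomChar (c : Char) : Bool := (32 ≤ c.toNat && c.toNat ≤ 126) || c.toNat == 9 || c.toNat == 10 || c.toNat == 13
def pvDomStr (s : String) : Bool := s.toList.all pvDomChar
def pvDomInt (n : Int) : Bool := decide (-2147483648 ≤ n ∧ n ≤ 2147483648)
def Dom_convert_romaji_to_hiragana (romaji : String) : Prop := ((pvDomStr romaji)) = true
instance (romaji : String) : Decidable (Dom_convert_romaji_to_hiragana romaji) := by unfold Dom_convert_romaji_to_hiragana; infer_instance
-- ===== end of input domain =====

set_option maxRecDepth 65536
set_option maxHeartbeats 2000000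

-- B replaces A's 82 sequential whole-string replace passes by one left-to-right scan over a
-- table parsed once from a compact "key:value"-pairs string; on strings containing "tsu"
-- the two differ intentionally (see D_ below).

-- ===== PORT A =====
-- the literal romaji → hiragana table of A (dict in insertion order)
def romajiHiraganaMap : List (String × String) := [
  ("kya", "きゃ"), ("kyu", "きゅ"), ("kyo", "きょ"), ("sha", "しゃ"), ("shu", "しゅ"),
  ("sho", "しょ"), ("cha", "ちゃ"), ("chu", "ちゅ"), ("cho", "ちょ"), ("nya", "にゃ"),
  ("nyu", "にゅ"), ("nyo", "にょ"), ("hya", "ひゃ"), ("hyu", "ひゅ"), ("hyo", "ひょ"),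
  ("mya", "みゃ"), ("myu", "みゅ"), ("myo", "みょ"), ("rya", "りゃ"), ("ryu", "りゅ"),
  ("ryo", "りょ"), ("ba", "ば"), ("bi", "び"), ("bu", "ぶ"), ("be", "べ"),
  ("bo", "ぼ"), ("pa", "ぱ"), ("pi", "ぴ"), ("pu", "ぷ"), ("pe", "ぺ"),
  ("po", "ぽ"), ("va", "ゔぁ"), ("vi", "ゔぃ"), ("vu", "ゔ"), ("ve", "ゔぇ"),
  ("vo", "ゔぉ"), ("ka", "か"), ("ki", "き"), ("ku", "く"), ("ke", "け"),
  ("ko", "こ"), ("sa", "さ"), ("shi", "し"), ("su", "す"), ("se", "せ"),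
  ("so", "そ"), ("ta", "た"), ("chi", "ち"), ("tsu", "つ"), ("te", "て"),
  ("to", "と"), ("na", "な"), ("ni", "に"), ("nu", "ぬ"), ("ne", "ね"),
  ("no", "の"), ("ha", "は"), ("hi", "ひ"), ("fu", "ふ"), ("he", "へ"),
  ("ho", "ほ"), ("ma", "ま"), ("mi", "み"), ("mu", "む"), ("me", "め"),
  ("mo", "も"), ("ya", "や"), ("yu", "ゆ"), ("yo", "よ"), ("ra", "ら"),
  ("ri", "り"), ("ru", "る"), ("re", "れ"), ("ro", "ろ"), ("wa", "わ"),
  ("wo", "を"), ("n", "ん"), ("a", "あ"), ("i", "い"), ("u", "う"),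
  ("e", "え"), ("o", "お") ]

def convert_romaji_to_hiragana (romaji : String) : String :=
  romajiHiraganaMap.foldl (fun hiragana kv => PySem.Str.replace hiragana kv.1 kv.2) romaji

-- ===== PORT B =====
-- Source B keeps the whole table as ONE compact string of space-separated "key:value" pairs;
-- here it appears as its character list (the Lean kernel evaluates List Char literals
-- directly, where a String literal would go through slow UTF-8 decoding)
def tableChars : List Char := ['k', 'y', 'a', ':', 'き', 'ゃ', ' ', 'k', 'y', 'u', ':', 'き', 'ゅ', ' ', 'k', 'y', 'o', ':', 'き', 'ょ', ' ', 's', 'h', 'a', ':', 'し', 'ゃ', ' ', 's', 'h', 'u', ':', 'し', 'ゅ', ' ', 's', 'h', 'o', ':', 'し', 'ょ', ' ', 'c', 'h', 'a', ':', 'ち', 'ゃ', ' ', 'c', 'h', 'u', ':', 'ち', 'ゅ', ' ', 'c', 'h', 'o', ':', 'ち', 'ょ', ' ', 'n', 'y', 'a', ':', 'に', 'ゃ', ' ', 'n', 'y', 'u', ':', 'に', 'ゅ', ' ', 'n', 'y', 'o', ':', 'に', 'ょ', ' ', 'h', 'y', 'a', ':', 'ひ', 'ゃ', ' ', 'h',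 'y', 'u', ':', 'ひ', 'ゅ', ' ', 'h', 'y', 'o', ':', 'ひ', 'ょ', ' ', 'm', 'y', 'a', ':', 'み', 'ゃ', ' ', 'm', 'y', 'u', ':', 'み', 'ゅ', ' ', 'm', 'y', 'o', ':', 'み', 'ょ', ' ', 'r', 'y', 'a', ':', 'り', 'ゃ', ' ', 'r', 'y', 'u', ':', 'り', 'ゅ', ' ', 'r', 'y', 'o', ':', 'り', 'ょ', ' ', 'b', 'a', ':', 'ば', ' ', 'b', 'i', ':', 'び', ' ', 'b', 'u', ':', 'ぶ', ' ', 'b', 'e', ':', 'べ', ' ', 'b', 'o', ':', 'ぼ', ' ', 'p', 'a', ':', 'ぱ', ' ', 'p', 'i', ':', 'ぴ', ' ', 'p', 'u', ':', 'ぷ', ' ', 'p', 'e', ':', 'ぺ', ' ', 'p', 'o', ':', 'ぽ', ' ', 'v', 'a', ':', 'ゔ', 'ぁ', ' ', 'v', 'i', ':', 'ゔ', 'ぃ', ' ', 'v', 'u', ':', 'ゔ', ' ', 'v', 'e', ':', 'ゔ', 'ぇ', ' ', 'v', 'o', ':', 'ゔ', 'ぉ', ' ', 'k', 'a', ':', 'か',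 ' ', 'k', 'i', ':', 'き', ' ', 'k', 'u', ':', 'く', ' ', 'k', 'e', ':', 'け', ' ', 'k', 'o', ':', 'こ', ' ', 's', 'a', ':', 'さ', ' ', 's', 'h', 'i', ':', 'し', ' ', 's', 'u', ':', 'す', ' ', 's', 'e', ':', 'せ', ' ', 's', 'o', ':', 'そ', ' ', 't', 'a', ':', 'た', ' ', 'c', 'h', 'i', ':', 'ち', ' ', 't', 's', 'u', ':', 'つ', ' ', 't', 'e', ':', 'て', ' ', 't', 'o', ':', 'と', ' ', 'n', 'a', ':', 'な', ' ', 'n', 'i', ':', 'に', ' ', 'n', 'u', ':', 'ぬ', ' ', 'n', 'e', ':', 'ね', ' ', 'n', 'o', ':', 'の', ' ', 'h', 'a', ':', 'は', ' ', 'h', 'i', ':', 'ひ', ' ', 'f', 'u', ':', 'ふ', ' ', 'h', 'e', ':', 'へ', ' ', 'h', 'o', ':', 'ほ', ' ', 'm', 'a', ':', 'ま', ' ', 'm', 'i', ':', 'み', ' ', 'm', 'u', ':', 'む', ' ', 'm', 'e', ':', 'め', ' ', 'm', 'o', ':', 'も', ' ', 'y', 'a', ':', 'や', ' ', 'y', 'u',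 ':', 'ゆ', ' ', 'y', 'o', ':', 'よ', ' ', 'r', 'a', ':', 'ら', ' ', 'r', 'i', ':', 'り', ' ', 'r', 'u', ':', 'る', ' ', 'r', 'e', ':', 'れ', ' ', 'r', 'o', ':', 'ろ', ' ', 'w', 'a', ':', 'わ', ' ', 'w', 'o', ':', 'を', ' ', 'n', ':', 'ん', ' ', 'a', ':', 'あ', ' ', 'i', ':', 'い', ' ', 'u', ':', 'う', ' ', 'e', ':', 'え', ' ', 'o', ':', 'お']

-- hand port of str.split(sep) for a one-char separator (exact: keys/values contain no ' '/':')
def splitSep (sep : Char) : List Char → List (List Char)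
  | [] => [[]]
  | c :: t =>
    if c == sep then [] :: splitSep sep t
    else match splitSep sep t with
      | [] => [[c]]
      | h :: r => (c :: h) :: r

-- Source B: e.split(':') unpacked into (key, value); the fallback arm is unreachable on the table
def splitPair (e : List Char) : List Char × List Char :=
  match splitSep ':' e with
  | [k, v] => (k, v)
  | _ => ([], [])

-- Source B: entries = [e.split(':') for e in _TABLE.split(' ')]
def altEntries : List (List Char × List Char) :=
  (splitSep ' ' tableChars).map splitPair

-- Source B inner for-loop: first entry of the table that matches here
def tryKeys : List (List Char × List Char) → List Char → Option (Nat × List Char)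
  | [], _ => none
  | kv :: rest, s => if kv.1.isPrefixOf s then some (kv.1.length, kv.2) else tryKeys rest s

-- Source B while-loop over positions, emitting pieces (fuel = remaining length, only to
-- make the same computation structurally total: each step consumes ≥ 1 character)
def scanGo : Nat → List Char → List Char
  | _, [] => []
  | 0, _ => []
  | fuel + 1, c :: t =>
    match tryKeys altEntries (c :: t) with
    | some (n, v) => v ++ scanGo fuel (List.drop (n - 1) t)
    | none => c :: scanGo fuel t

def convert_romaji_to_hiragana_alt (romaji : String) : String :=
  String.ofList (scanGo romaji.toList.length romaji.toList)

-- ===== PRECONDITION & SPEC =====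
-- On strings containing the substring "tsu", A's map order replaces 'su' (sa-row) before
-- 'tsu' is ever tried, so A returns "tす" for each 'tsu' occurrence, while B returns the
-- intended つ; B's value is what the transliteration table itself specifies ('tsu': 'つ').
def D_convert_romaji_to_hiragana (romaji : String) : Prop :=
  PySem.Str.isIn "tsu" romaji = true
instance (romaji : String) : Decidable (D_convert_romaji_to_hiragana romaji) := by
  unfold D_convert_romaji_to_hiragana; infer_instance

def Spec_convert_romaji_to_hiragana (romaji : String) (out : String) : Prop :=
  ¬ D_convert_romaji_to_hiragana romaji → out = convert_romaji_to_hiragana_alt romaji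
instance (romaji : String) (out : String) : Decidable (Spec_convert_romaji_to_hiragana romaji out) := by
  unfold Spec_convert_romaji_to_hiragana; infer_instance

def pvDiffWitness_convert_romaji_to_hiragana : String := "tsu"
def pvDiffWitnessOut_convert_romaji_to_hiragana : String × String := ("tす", "つ")

-- ===== CLAIM (what is proved, stated in full; the proofs are below) =====
def Claim_unchanged_convert_romaji_to_hiragana : Prop := ∀ (romaji : String), Dom_convert_romaji_to_hiragana romaji → Spec_convert_romaji_to_hiragana romaji (convert_romaji_to_hiragana romaji)
def Claim_exact_convert_romaji_to_hiragana : Prop := ∀ (romaji : String), Dom_convert_romaji_to_hiragana romaji → D_convert_romaji_to_hiragana romaji → convert_romaji_to_hiragana romaji ≠ convert_romaji_to_hiragana_alt romaji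
def Claim_changed_convert_romaji_to_hiragana : Prop := Dom_convert_romaji_to_hiragana (pvDiffWitness_convert_romaji_to_hiragana) ∧ D_convert_romaji_to_hiragana (pvDiffWitness_convert_romaji_to_hiragana) ∧ convert_romaji_to_hiragana (pvDiffWitness_convert_romaji_to_hiragana) = pvDiffWitnessOut_convert_romaji_to_hiragana.1 ∧ convert_romaji_to_hiragana_alt (pvDiffWitness_convert_romaji_to_hiragana) = pvDiffWitnessOut_convert_romaji_to_hiragana.2 ∧ pvDiffWitnessOut_convert_romaji_to_hiragana.1 ≠ pvDiffWitnessOut_convert_romaji_to_hiragana.2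

-- ===== LEMMAS AND PROOFS =====

-- A's table with both components as char lists (proof-side view shared by both arguments)
def keyListC : List (List Char × List Char) :=
  romajiHiraganaMap.map (fun kv => (kv.1.toList, kv.2.toList))

-- B's parsed table is exactly A's table (char-list view)
lemma altEntries_eq : altEntries = keyListC := by decide

-- ascii test: the map's keys are ASCII, its values are not
def isA (c : Char) : Bool := decide (c.toNat < 128)

-- reference implementation of one replace pass (old ≠ []), structurally convenient
def repl1 (old new : List Char) : List Char → List Char
  | [] => []
  | c :: t =>
    if old.isPrefixOf (c :: t) then new ++ repl1 old new (List.drop (old.length - 1) t)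
    else c :: repl1 old new t
termination_by s => s.length
decreasing_by
all_goals simp

lemma go_eq_repl1 (old new : List Char) (hold : old ≠ []) :
    ∀ (fuel : Nat) (l acc : List Char), l.length ≤ fuel →
      PySem.Chars.replace.go old new fuel l acc = acc.reverse ++ repl1 old new l := by
  intro fuel
  induction fuel with
  | zero =>
    intro l acc hl
    have hnil : l = [] := List.length_eq_zero_iff.mp (Nat.le_zero.mp hl)
    subst hnil
    rw [PySem.Chars.replace.go.eq_def]
    simp [repl1]
  | succ fuel ih =>
    intro l acc hl
    cases l with
    | nil =>
      rw [PySem.Chars.replace.go.eq_def]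
      simp [repl1]
    | cons c t =>
      rw [PySem.Chars.replace.go.eq_def]
      simp only []
      by_cases hpre : old.isPrefixOf (c :: t) = true
      · rw [if_pos hpre]
        obtain ⟨oh, ot, rfl⟩ : ∃ oh ot, old = oh :: ot := by
          cases old with
          | nil => exact absurd rfl hold
          | cons oh ot => exact ⟨oh, ot, rfl⟩
        have hlen2 : (List.drop (oh :: ot).length (c :: t)).length ≤ fuel := by
          simp only [List.length_drop, List.length_cons] at *
          omega
        rw [ih _ _ hlen2]
        rw [repl1, if_pos hpre]
        simp [List.drop_succ_cons]
      · rw [if_neg hpre]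
        have hlen2 : t.length ≤ fuel := by
          simp only [List.length_cons] at hl
          omega
        rw [ih _ _ hlen2]
        rw [repl1, if_neg hpre]
        simp

lemma replace_eq_repl1 (s old new : List Char) (hold : old ≠ []) :
    PySem.Chars.replace s old new = repl1 old new s := by
  unfold PySem.Chars.replace
  rw [if_neg (by simpa [List.isEmpty_iff] using hold)]
  simpa using go_eq_repl1 old new hold s.length s [] le_rfl

lemma mapOK : keyListC.all
    (fun kv => !kv.1.isEmpty && kv.1.all isA && !kv.2.isEmpty && kv.2.all (fun c => !isA c)) = true := by
  decide

lemma key_ne_nil {kv} (h : kv ∈ keyListC) : kv.1 ≠ [] := by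
  have h' := List.all_eq_true.mp mapOK kv h
  simp only [Bool.and_eq_true, Bool.not_eq_true', List.isEmpty_eq_false_iff] at h'
  exact h'.1.1.1

lemma key_ascii {kv} (h : kv ∈ keyListC) : kv.1.all isA = true := by
  have h' := List.all_eq_true.mp mapOK kv h
  simp only [Bool.and_eq_true] at h'
  exact h'.1.1.2

lemma val_ne_nil {kv} (h : kv ∈ keyListC) : kv.2 ≠ [] := by
  have h' := List.all_eq_true.mp mapOK kv h
  simp only [Bool.and_eq_true, Bool.not_eq_true', List.isEmpty_eq_false_iff] at h'
  exact h'.1.2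

lemma val_nonascii {kv} (h : kv ∈ keyListC) : kv.2.all (fun c => !isA c) = true := by
  have h' := List.all_eq_true.mp mapOK kv h
  simp only [Bool.and_eq_true] at h'
  exact h'.2

-- x is obtained from t by replacing some non-overlapping key occurrences by their values
inductive Ev : List Char → List Char → Prop
  | nil : Ev [] []
  | keep (c : Char) {t x : List Char} : Ev t x → Ev (c :: t) (c :: x)
  | repl {k v t x : List Char} : (k, v) ∈ keyListC → Ev t x → Ev (k ++ t) (v ++ x)

lemma Ev.refl' : ∀ t, Ev t t := by
  intro t; induction t with
  | nil => exact Ev.nil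
  | cons c t ih => exact Ev.keep c ih

-- an all-ASCII prefix of the evolved string is a prefix of the original, and Ev passes to the drops
lemma evSplit {t x : List Char} (hev : Ev t x) :
    ∀ p : List Char, p.all isA = true → p <+: x →
      p <+: t ∧ Ev (List.drop p.length t) (List.drop p.length x) := by
  induction hev with
  | nil =>
    intro p hp hpre
    have hnil : p = [] := List.prefix_nil.mp hpre
    subst hnil
    exact ⟨List.nil_prefix, Ev.nil⟩
  | keep c h ih =>
    intro p hp hpre
    cases p with
    | nil => exact ⟨List.nil_prefix, by simpa using Ev.keep c h⟩
    | cons a p' =>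
      obtain ⟨heq, hp'⟩ := List.cons_prefix_cons.mp hpre
      subst heq
      simp only [List.all_cons, Bool.and_eq_true] at hp
      obtain ⟨h1, h2⟩ := ih p' hp.2 hp'
      exact ⟨List.cons_prefix_cons.mpr ⟨rfl, h1⟩, by simpa [List.drop_succ_cons] using h2⟩
  | repl hmem h ih =>
    rename_i k v t' x'
    intro p hp hpre
    cases p with
    | nil => exact ⟨List.nil_prefix, by simpa using Ev.repl hmem h⟩
    | cons a p' =>
      exfalso
      obtain ⟨b, v', rfl⟩ : ∃ b v', v = b :: v' := by
        cases v with
        | nil => exact absurd rfl (val_ne_nil hmem)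
        | cons b v' => exact ⟨b, v', rfl⟩
      obtain ⟨heq, -⟩ := List.cons_prefix_cons.mp hpre
      subst heq
      simp only [List.all_cons, Bool.and_eq_true] at hp
      have hv := val_nonascii hmem
      simp only [List.all_cons, Bool.and_eq_true, Bool.not_eq_true'] at hv
      rw [hv.1] at hp
      exact Bool.false_ne_true hp.1

lemma liftPrefix (q : List Char) {t x : List Char} (hev : Ev t x) :
    ∀ p : List Char, p.all isA = true → p <+: q ++ x → p <+: q ++ t := by
  induction q with
  | nil =>
    intro p hp hpre
    simpa using (evSplit hev p hp (by simpa using hpre)).1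
  | cons c q' ih =>
    intro p hp hpre
    cases p with
    | nil => exact List.nil_prefix
    | cons a p' =>
      obtain ⟨heq, h'⟩ := List.cons_prefix_cons.mp (by simpa using hpre)
      subst heq
      simp only [List.all_cons, Bool.and_eq_true] at hp
      exact List.cons_prefix_cons.mpr ⟨rfl, ih p' hp.2 h'⟩

lemma replAppendNonAscii (k v : List Char) (hk : k ≠ []) (hka : k.all isA = true) :
    ∀ p x : List Char, p.all (fun c => !isA c) = true →
      repl1 k v (p ++ x) = p ++ repl1 k v x := by
  intro p
  induction p with
  | nil => intro x _; simp
  | cons d p' ih =>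
    intro x hp
    simp only [List.all_cons, Bool.and_eq_true, Bool.not_eq_true'] at hp
    have hnpre : ¬ k.isPrefixOf (d :: (p' ++ x)) = true := by
      cases k with
      | nil => exact absurd rfl hk
      | cons kh k1 =>
        intro hc
        obtain ⟨heq, -⟩ := List.cons_prefix_cons.mp (List.isPrefixOf_iff_prefix.mp hc)
        simp only [List.all_cons, Bool.and_eq_true] at hka
        rw [heq, hp.1] at hka
        exact Bool.false_ne_true hka.1
    rw [List.cons_append, repl1, if_neg hnpre, ih x hp.2, List.cons_append]

lemma replSkip (k v : List Char) :
    ∀ p x : List Char, (∀ j, j < p.length → ¬ k <+: (p ++ x).drop j) →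
      repl1 k v (p ++ x) = p ++ repl1 k v x := by
  intro p
  induction p with
  | nil => intro x _; simp
  | cons c p' ih =>
    intro x H
    have h0 : ¬ k <+: c :: (p' ++ x) := by simpa using H 0 (by simp)
    rw [List.cons_append, repl1, if_neg (fun hc => h0 (List.isPrefixOf_iff_prefix.mp hc))]
    rw [ih x (fun j hj => by
      simpa [List.drop_succ_cons] using H (j + 1) (by simpa using Nat.succ_lt_succ hj)),
      List.cons_append]

lemma replFront (k v x : List Char) (hk : k ≠ []) :
    repl1 k v (k ++ x) = v ++ repl1 k v x := by
  cases k with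
  | nil => exact absurd rfl hk
  | cons c k1 =>
    rw [List.cons_append, repl1,
      if_pos (List.isPrefixOf_iff_prefix.mpr (by
        rw [← List.cons_append]; exact List.prefix_append _ _))]
    congr 2
    simp

lemma evClosure : ∀ (n : Nat) {k v : List Char}, (k, v) ∈ keyListC →
    ∀ {t x : List Char}, x.length ≤ n → Ev t x → Ev t (repl1 k v x) := by
  intro n
  induction n with
  | zero =>
    intro k v hmem t x hlen hev
    have hnil : x = [] := List.length_eq_zero_iff.mp (Nat.le_zero.mp hlen)
    subst hnil
    simpa [repl1] using hev
  | succ n ih =>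
    intro k v hmem t x hlen hev
    cases hev with
    | nil => simpa [repl1] using Ev.nil
    | keep c h =>
      rename_i t0 x0
      by_cases hpre : k.isPrefixOf (c :: x0) = true
      · obtain ⟨kh, k1, rfl⟩ : ∃ kh k1, k = kh :: k1 := by
          cases k with
          | nil => exact absurd rfl (key_ne_nil hmem)
          | cons kh k1 => exact ⟨kh, k1, rfl⟩
        obtain ⟨heq, hk1⟩ := List.cons_prefix_cons.mp (List.isPrefixOf_iff_prefix.mp hpre)
        subst heq
        have hka := key_ascii hmem
        simp only [List.all_cons, Bool.and_eq_true] at hka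
        obtain ⟨hpt, hed⟩ := evSplit h k1 hka.2 hk1
        have hlen' : (List.drop k1.length x0).length ≤ n := by
          simp only [List.length_drop]
          simp only [List.length_cons] at hlen
          omega
        have ihres := ih hmem hlen' hed
        rw [repl1, if_pos hpre]
        have hdrop : (kh :: k1).length - 1 = k1.length := by simp
        rw [hdrop]
        have ht0 : kh :: t0 = (kh :: k1) ++ List.drop k1.length t0 := by
          have htk := List.prefix_iff_eq_take.mp hpt
          conv_lhs => rw [show t0 = k1 ++ List.drop k1.length t0 from by
            conv_lhs => rw [← List.take_append_drop k1.length t0]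
            rw [← htk]]
          rfl
        rw [ht0]
        exact Ev.repl hmem ihres
      · rw [repl1, if_neg hpre]
        refine Ev.keep c (ih hmem ?_ h)
        simp only [List.length_cons] at hlen
        omega
    | repl hmem2 h =>
      rename_i k2 v2 t0 x0
      rw [replAppendNonAscii k v (key_ne_nil hmem) (key_ascii hmem) v2 x0 (val_nonascii hmem2)]
      refine Ev.repl hmem2 (ih hmem ?_ h)
      have hv2 : v2 ≠ [] := val_ne_nil hmem2
      have : 1 ≤ v2.length := List.length_pos_of_ne_nil hv2
      simp only [List.length_append] at hlen
      omega

def chain (ks : List (List Char × List Char)) (x : List Char) : List Char :=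
  ks.foldl (fun h kv => repl1 kv.1 kv.2 h) x

lemma chain_nil : ∀ ks, chain ks [] = [] := by
  intro ks; induction ks with
  | nil => rfl
  | cons kv ks ih => simpa [chain, repl1] using ih

lemma foldl_replace_toList :
    ∀ (ks : List (String × String)) (s : String),
      (ks.foldl (fun h kv => PySem.Str.replace h kv.1 kv.2) s).toList =
        (ks.map (fun kv => (kv.1.toList, kv.2.toList))).foldl
          (fun h kv => PySem.Chars.replace h kv.1 kv.2) s.toList := by
  intro ks
  induction ks with
  | nil => intro s; rfl
  | cons kv ks ih =>
    intro s
    simp only [List.foldl_cons, List.map_cons]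
    rw [ih, PySem.Str.toList_replace]

lemma foldl_chars_eq_chain :
    ∀ (ks : List (List Char × List Char)), (∀ kv ∈ ks, kv.1 ≠ []) → ∀ x,
      ks.foldl (fun h kv => PySem.Chars.replace h kv.1 kv.2) x = chain ks x := by
  intro ks
  induction ks with
  | nil => intro _ x; rfl
  | cons kv ks ih =>
    intro h x
    simp only [List.foldl_cons, chain] at *
    rw [replace_eq_repl1 _ _ _ (h kv (List.mem_cons_self))]
    exact ih (fun kv' h' => h kv' (List.mem_cons_of_mem _ h')) _

lemma tryKeys_some : ∀ (ks : List (List Char × List Char)) (s : List Char) (n : Nat) (v : List Char),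
    tryKeys ks s = some (n, v) →
      ∃ pre k post, ks = pre ++ (k, v) :: post ∧ k <+: s ∧ n = k.length ∧
        ∀ kv ∈ pre, ¬ kv.1 <+: s := by
  intro ks
  induction ks with
  | nil => intro s n v h; simp [tryKeys] at h
  | cons kv ks ih =>
    intro s n v h
    rw [tryKeys] at h
    by_cases hpre : kv.1.isPrefixOf s = true
    · rw [if_pos hpre] at h
      obtain ⟨rfl, rfl⟩ : kv.1.length = n ∧ kv.2 = v := by
        refine ⟨?_, ?_⟩ <;> · injection h with h'; cases h'; rfl
      exact ⟨[], kv.1, ks, by simp, List.isPrefixOf_iff_prefix.mp hpre, rfl, by simp⟩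
    · rw [if_neg hpre] at h
      obtain ⟨pre, k, post, h1, h2, h3, h4⟩ := ih s n v h
      refine ⟨kv :: pre, k, post, by rw [h1]; rfl, h2, h3, ?_⟩
      intro kv' hkv'
      rcases List.mem_cons.mp hkv' with rfl | hm
      · exact fun hc => hpre (List.isPrefixOf_iff_prefix.mpr hc)
      · exact h4 kv' hm

lemma tryKeys_none : ∀ (ks : List (List Char × List Char)) (s : List Char),
    tryKeys ks s = none → ∀ kv ∈ ks, ¬ kv.1 <+: s := by
  intro ks
  induction ks with
  | nil => intro s _ kv h; simp at h
  | cons kv0 ks ih =>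
    intro s h kv hkv
    rw [tryKeys] at h
    by_cases hpre : kv0.1.isPrefixOf s = true
    · rw [if_pos hpre] at h; exact absurd h (by simp)
    · rw [if_neg hpre] at h
      rcases List.mem_cons.mp hkv with rfl | hm
      · exact fun hc => hpre (List.isPrefixOf_iff_prefix.mpr hc)
      · exact ih s h kv hm

-- the combinatorial heart: an earlier key is never compatible with a proper suffix of a
-- later key, except 'su' inside 'tsu'
def overlapB (x y : List Char × List Char) : Bool :=
  (List.range y.1.length).all fun j =>
    j == 0 || !(x.1.isPrefixOf (y.1.drop j) || (y.1.drop j).isPrefixOf x.1) || y.1 == ['t', 's', 'u']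

lemma mapPairwise : List.Pairwise (fun x y => overlapB x y = true) keyListC := by decide

lemma overlapB_spec {x y : List Char × List Char} (h : overlapB x y = true)
    {j : Nat} (hj : j < y.1.length) (hj1 : 1 ≤ j)
    (hc : (x.1.isPrefixOf (y.1.drop j) || (y.1.drop j).isPrefixOf x.1) = true) :
    y.1 = ['t', 's', 'u'] := by
  have := List.all_eq_true.mp h j (List.mem_range.mpr hj)
  simp only [Bool.or_eq_true, beq_iff_eq] at this
  rcases this with (h0 | hn) | he
  · omega
  · rw [hc] at hn; simp at hn
  · exact he

lemma chainPre (k rest : List Char) :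
    ∀ ks : List (List Char × List Char), (∀ kv ∈ ks, kv ∈ keyListC) →
      (∀ kv ∈ ks, ∀ j, j < k.length → ¬ kv.1 <+: (k ++ rest).drop j) →
      ∀ x, Ev rest x →
        chain ks (k ++ x) = k ++ chain ks x ∧ Ev rest (chain ks x) := by
  intro ks
  induction ks with
  | nil => intro _ _ x hev; exact ⟨rfl, hev⟩
  | cons kv ks ih =>
    intro hmem hcond x hev
    have hkvm : kv ∈ keyListC := hmem kv List.mem_cons_self
    have hkvm' : (kv.1, kv.2) ∈ keyListC := by simpa using hkvm
    have hstep : repl1 kv.1 kv.2 (k ++ x) = k ++ repl1 kv.1 kv.2 x := by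
      apply replSkip
      intro j hj hcon
      have hjle : j ≤ k.length := Nat.le_of_lt hj
      rw [List.drop_append_of_le_length hjle] at hcon
      have hlift := liftPrefix (k.drop j) hev kv.1 (key_ascii hkvm) hcon
      rw [← List.drop_append_of_le_length hjle] at hlift
      exact hcond kv List.mem_cons_self j hj hlift
    have hev' : Ev rest (repl1 kv.1 kv.2 x) := evClosure x.length hkvm' le_rfl hev
    obtain ⟨h1, h2⟩ := ih (fun kv' h' => hmem kv' (List.mem_cons_of_mem _ h'))
      (fun kv' h' => hcond kv' (List.mem_cons_of_mem _ h')) (repl1 kv.1 kv.2 x) hev'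
    constructor
    · show chain ks (repl1 kv.1 kv.2 (k ++ x)) = k ++ chain ks (repl1 kv.1 kv.2 x)
      rw [hstep]; exact h1
    · exact h2

lemma chainPost (vs rest : List Char) (hv : vs.all (fun c => !isA c) = true) :
    ∀ ks : List (List Char × List Char), (∀ kv ∈ ks, kv ∈ keyListC) →
      ∀ y, Ev rest y → chain ks (vs ++ y) = vs ++ chain ks y := by
  intro ks
  induction ks with
  | nil => intro _ y _; rfl
  | cons kv ks ih =>
    intro hmem y hev
    have hkvm : kv ∈ keyListC := hmem kv List.mem_cons_self
    have hkvm' : (kv.1, kv.2) ∈ keyListC := by simpa using hkvm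
    have hstep : repl1 kv.1 kv.2 (vs ++ y) = vs ++ repl1 kv.1 kv.2 y :=
      replAppendNonAscii kv.1 kv.2 (key_ne_nil hkvm) (key_ascii hkvm) vs y hv
    have hev' : Ev rest (repl1 kv.1 kv.2 y) := evClosure y.length hkvm' le_rfl hev
    show chain ks (repl1 kv.1 kv.2 (vs ++ y)) = vs ++ chain ks (repl1 kv.1 kv.2 y)
    rw [hstep]
    exact ih (fun kv' h' => hmem kv' (List.mem_cons_of_mem _ h')) _ hev'

lemma chainCons (c : Char) (t : List Char) :
    ∀ ks : List (List Char × List Char), (∀ kv ∈ ks, kv ∈ keyListC) →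
      (∀ kv ∈ ks, ¬ kv.1 <+: c :: t) →
      ∀ x, Ev t x → chain ks (c :: x) = c :: chain ks x ∧ Ev t (chain ks x) := by
  intro ks
  induction ks with
  | nil => intro _ _ x hev; exact ⟨rfl, hev⟩
  | cons kv ks ih =>
    intro hmem hnm x hev
    have hkvm : kv ∈ keyListC := hmem kv List.mem_cons_self
    have hkvm' : (kv.1, kv.2) ∈ keyListC := by simpa using hkvm
    have hstep : repl1 kv.1 kv.2 (c :: x) = c :: repl1 kv.1 kv.2 x := by
      have := replSkip kv.1 kv.2 [c] x (by
        intro j hj hcon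
        have hj0 : j = 0 := by simpa using hj
        subst hj0
        simp only [List.singleton_append, List.drop_zero] at hcon
        exact hnm kv List.mem_cons_self (liftPrefix [c] hev kv.1 (key_ascii hkvm) hcon))
      simpa using this
    have hev' : Ev t (repl1 kv.1 kv.2 x) := evClosure x.length hkvm' le_rfl hev
    obtain ⟨h1, h2⟩ := ih (fun kv' h' => hmem kv' (List.mem_cons_of_mem _ h'))
      (fun kv' h' => hnm kv' (List.mem_cons_of_mem _ h')) (repl1 kv.1 kv.2 x) hev'
    constructor
    · show chain ks (repl1 kv.1 kv.2 (c :: x)) = c :: chain ks (repl1 kv.1 kv.2 x)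
      rw [hstep]; exact h1
    · exact h2

lemma chain_scan : ∀ (n : Nat) (s : List Char), s.length ≤ n → ¬ (['t', 's', 'u'] <:+: s) →
    chain keyListC s = scanGo n s := by
  intro n
  induction n with
  | zero =>
    intro s hlen _
    have hnil : s = [] := List.length_eq_zero_iff.mp (Nat.le_zero.mp hlen)
    subst hnil
    rw [chain_nil]; rfl
  | succ n ih =>
    intro s hlen hfree
    cases s with
    | nil => rw [chain_nil]; rfl
    | cons c t =>
      rw [scanGo, altEntries_eq]
      cases htk : tryKeys keyListC (c :: t) with
      | none =>
        simp only []
        have hnone := tryKeys_none keyListC (c :: t) htk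
        obtain ⟨h1, h2⟩ := chainCons c t keyListC (fun kv h => h) hnone t (Ev.refl' t)
        rw [h1, ih t (by simp only [List.length_cons] at hlen; omega)
          (fun h => hfree (List.infix_cons h))]
      | some nv =>
        obtain ⟨n', v⟩ := nv
        simp only []
        obtain ⟨pre, k, post, hsplit, hkpre, hn, hprenm⟩ := tryKeys_some _ _ _ _ htk
        have hkm : (k, v) ∈ keyListC := by
          rw [hsplit]; exact List.mem_append_right _ List.mem_cons_self
        have hkne : k ≠ [] := key_ne_nil hkm
        have hk1 : 1 ≤ k.length := List.length_pos_of_ne_nil hkne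
        have hct : c :: t = k ++ List.drop k.length (c :: t) := by
          conv_lhs => rw [← List.take_append_drop k.length (c :: t)]
          rw [← List.prefix_iff_eq_take.mp hkpre]
        set rest := List.drop k.length (c :: t) with hrest
        have hcond : ∀ kv ∈ pre, ∀ j, j < k.length → ¬ kv.1 <+: (k ++ rest).drop j := by
          intro kv hkv j hj hcon
          rcases Nat.eq_zero_or_pos j with rfl | hj1
          · rw [List.drop_zero, ← hct] at hcon
            exact hprenm kv hkv hcon
          · have hjle : j ≤ k.length := Nat.le_of_lt hj
            rw [List.drop_append_of_le_length hjle] at hcon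
            have hcompat := List.prefix_or_prefix_of_prefix hcon (List.prefix_append _ _)
            have hB : (kv.1.isPrefixOf (k.drop j) || (k.drop j).isPrefixOf kv.1) = true := by
              rcases hcompat with h | h
              · simp [List.isPrefixOf_iff_prefix.mpr h]
              · simp [List.isPrefixOf_iff_prefix.mpr h]
            have hpw := mapPairwise
            rw [hsplit, List.pairwise_append] at hpw
            have hover := hpw.2.2 kv hkv (k, v) List.mem_cons_self
            have htsu : k = ['t', 's', 'u'] := overlapB_spec hover hj hj1 hB
            rw [htsu] at hkpre
            exact hfree hkpre.isInfix
        have hpremem : ∀ kv ∈ pre, kv ∈ keyListC := fun kv h => by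
          rw [hsplit]; exact List.mem_append_left _ h
        obtain ⟨hA, hEvA⟩ := chainPre k rest pre hpremem hcond rest (Ev.refl' rest)
        have hEvB : Ev rest (repl1 k v (chain pre rest)) := evClosure _ hkm le_rfl hEvA
        have hpostmem : ∀ kv ∈ post, kv ∈ keyListC := fun kv h => by
          rw [hsplit]; exact List.mem_append_right _ (List.mem_cons_of_mem _ h)
        have hfold : chain keyListC (c :: t) = v ++ chain keyListC rest := by
          conv_lhs => rw [hct]
          rw [hsplit]
          show chain (pre ++ (k, v) :: post) (k ++ rest) = v ++ chain (pre ++ (k, v) :: post) rest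
          unfold chain
          rw [List.foldl_append, List.foldl_append]
          simp only [List.foldl_cons]
          have hA' : List.foldl (fun h kv => repl1 kv.1 kv.2 h) (k ++ rest) pre
              = k ++ chain pre rest := hA
          rw [hA', replFront k v _ hkne]
          exact chainPost v rest (val_nonascii hkm) post hpostmem _ hEvB
        rw [hfold]
        congr 1
        have hdropt : List.drop (n' - 1) t = rest := by
          subst hn
          obtain ⟨kh, k1, rfl⟩ : ∃ kh k1, k = kh :: k1 := by
            cases k with
            | nil => exact absurd rfl hkne
            | cons kh k1 => exact ⟨kh, k1, rfl⟩
          simp [hrest, List.drop_succ_cons]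
        rw [hdropt]
        apply ih
        · have : rest.length = (c :: t).length - k.length := by simp [hrest]
          simp only [List.length_cons] at this hlen
          omega
        · intro h
          apply hfree
          rw [hct]
          exact h.trans (List.suffix_append _ _).isInfix


lemma portA_toList (romaji : String) :
    (convert_romaji_to_hiragana romaji).toList = chain keyListC romaji.toList := by
  unfold convert_romaji_to_hiragana
  rw [foldl_replace_toList]
  exact foldl_chars_eq_chain keyListC (fun kv h => key_ne_nil h) _

-- ===== lemmas for the tight claim (A ≠ B on every string containing "tsu") =====

lemma keySplit : keyListC = keyListC.take 43 ++ (['s', 'u'], ['す']) ::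
    ((keyListC.drop 44).take 4 ++ (['t', 's', 'u'], ['つ']) :: keyListC.drop 49) := by decide

lemma tsu_mem : ((['t', 's', 'u'] : List Char), (['つ'] : List Char)) ∈ keyListC := by
  rw [keySplit]
  exact List.mem_append_right _ (List.mem_cons_of_mem _
    (List.mem_append_right _ List.mem_cons_self))

lemma keyTailB : keyListC.all (fun kv => (kv.1.drop 1).all (fun c => !(c == 't'))) = true := by
  decide

lemma keyTail_no_t : ∀ kv ∈ keyListC, ∀ c ∈ kv.1.drop 1, c ≠ 't' := by
  intro kv hkv c hc
  have h := List.all_eq_true.mp (List.all_eq_true.mp keyTailB kv hkv) c hc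
  simpa using h

lemma keyPrefixB : keyListC.all
    (fun kv => !(kv.1.isPrefixOf ['t', 's', 'u']) || kv.1 == ['t', 's', 'u']) = true := by decide

lemma key_prefix_tsu : ∀ kv ∈ keyListC, kv.1 <+: ['t', 's', 'u'] → kv.1 = ['t', 's', 'u'] := by
  intro kv hkv hpre
  have h := List.all_eq_true.mp keyPrefixB kv hkv
  simp only [Bool.or_eq_true, Bool.not_eq_true', beq_iff_eq] at h
  rcases h with h | h
  · rw [List.isPrefixOf_iff_prefix.mpr hpre] at h
    simp at h
  · exact h

lemma keyLenB : keyListC.all (fun kv => decide (kv.1.length ≤ 3)) = true := by decide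

lemma key_len3 : ∀ kv ∈ keyListC, kv.1.length ≤ 3 := by
  intro kv hkv
  simpa using List.all_eq_true.mp keyLenB kv hkv

lemma keyTsuValB : keyListC.all
    (fun kv => !(kv.1 == ['t', 's', 'u']) || kv.2 == ['つ']) = true := by decide

lemma key_tsu_val : ∀ kv ∈ keyListC, kv.1 = ['t', 's', 'u'] → kv.2 = ['つ'] := by
  intro kv hkv heq
  have h := List.all_eq_true.mp keyTsuValB kv hkv
  simp only [Bool.or_eq_true, Bool.not_eq_true', beq_iff_eq] at h
  rcases h with h | h
  · exact absurd heq (by simpa using h)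
  · exact h

-- B emits a 'つ' for (at least) the first "tsu" occurrence
lemma scan_has_tsu : ∀ (n : Nat) (s : List Char), s.length ≤ n → ['t', 's', 'u'] <:+: s →
    'つ' ∈ scanGo n s := by
  intro n
  induction n with
  | zero =>
    intro s hlen hinf
    have hnil : s = [] := List.length_eq_zero_iff.mp (Nat.le_zero.mp hlen)
    subst hnil
    simp [List.infix_nil] at hinf
  | succ n ih =>
    intro s hlen hinf
    cases s with
    | nil => simp [List.infix_nil] at hinf
    | cons c t =>
      rw [scanGo, altEntries_eq]
      cases htk : tryKeys keyListC (c :: t) with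
      | none =>
        simp only []
        rcases List.infix_cons_iff.mp hinf with hpre | hinf'
        · exact absurd hpre (tryKeys_none _ _ htk (['t', 's', 'u'], ['つ']) tsu_mem)
        · exact List.mem_cons_of_mem _ (ih t (by simp only [List.length_cons] at hlen; omega) hinf')
      | some nv =>
        obtain ⟨n', v⟩ := nv
        simp only []
        obtain ⟨pre, k, post, hsplit, hkpre, hn, hprenm⟩ := tryKeys_some _ _ _ _ htk
        have hkm : (k, v) ∈ keyListC := by
          rw [hsplit]; exact List.mem_append_right _ List.mem_cons_self
        have hkne : k ≠ [] := key_ne_nil hkm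
        have hk1 : 1 ≤ k.length := List.length_pos_of_ne_nil hkne
        by_cases hts : ['t', 's', 'u'] <+: c :: t
        · have hktsu : k = ['t', 's', 'u'] := by
            rcases List.prefix_or_prefix_of_prefix hkpre hts with h | h
            · exact key_prefix_tsu (k, v) hkm h
            · exact ((List.IsPrefix.eq_of_length_le h (by simpa using key_len3 (k, v) hkm))).symm
          have hv : v = ['つ'] := key_tsu_val (k, v) hkm hktsu
          subst hv
          exact List.mem_append_left _ (by simp)
        · obtain ⟨a, b, hab⟩ : ∃ a b, a ++ ['t', 's', 'u'] ++ b = c :: t := hinf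
          have hLa : k.length ≤ a.length := by
            by_contra hgt
            push_neg at hgt
            have hapre : a <+: c :: t := by
              rw [← hab, List.append_assoc]; exact List.prefix_append _ _
            have hak : a <+: k := by
              rcases List.prefix_or_prefix_of_prefix hapre hkpre with h | h
              · exact h
              · exact absurd (List.IsPrefix.length_le h) (by omega)
            have hks := List.prefix_iff_eq_append.mp hkpre
            have h1 : (c :: t)[a.length]? = some 't' := by
              rw [← hab, List.append_assoc, List.getElem?_append_right (le_refl a.length)]
              simp
            have h2 : k[a.length]? = some 't' := by
              rw [← hks, List.getElem?_append_left (by omega)] at h1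
              exact h1
            have h4 : (List.drop a.length k)[0]? = some 't' := by
              rw [List.getElem?_drop]; simpa using h2
            have h5 : 't' ∈ List.drop a.length k := by
              have := List.getElem?_eq_some_iff.mp h4
              obtain ⟨hlt, hget⟩ := this
              exact hget ▸ List.getElem_mem hlt
            have h6 : 't' ∈ List.drop 1 k := by
              have hane : 1 ≤ a.length := by
                rcases Nat.eq_zero_or_pos a.length with h0 | h0
                · exfalso
                  apply hts
                  have : a = [] := List.length_eq_zero_iff.mp h0
                  subst this
                  rw [← hab]; simpa using List.prefix_append _ _
                · exact h0
              have : List.drop a.length k = List.drop (a.length - 1) (List.drop 1 k) := by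
                rw [List.drop_drop]; congr 1; omega
              rw [this] at h5
              exact List.mem_of_mem_drop h5
            exact keyTail_no_t (k, v) hkm 't' h6 rfl
          have hdropt : List.drop (n' - 1) t = List.drop n' (c :: t) := by
            subst hn
            obtain ⟨kh, k1, rfl⟩ : ∃ kh k1, k = kh :: k1 := by
              cases k with
              | nil => exact absurd rfl hkne
              | cons kh k1 => exact ⟨kh, k1, rfl⟩
            simp [List.drop_succ_cons]
          have hrem : ['t', 's', 'u'] <:+: List.drop (n' - 1) t := by
            rw [hdropt, ← hab, List.append_assoc,
              List.drop_append_of_le_length (by omega : n' ≤ a.length), ← List.append_assoc]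
            exact List.infix_append _ _ _
          refine List.mem_append_right _ (ih _ ?_ hrem)
          simp only [List.length_drop]
          simp only [List.length_cons] at hlen
          omega

lemma repl1_id (k v : List Char) : ∀ y, (∀ j, ¬ k <+: y.drop j) → repl1 k v y = y := by
  intro y
  induction y with
  | nil => intro _; simp [repl1]
  | cons c t ih =>
    intro H
    rw [repl1, if_neg (fun hc => H 0 (by simpa using List.isPrefixOf_iff_prefix.mp hc))]
    rw [ih (fun j => by simpa [List.drop_succ_cons] using H (j + 1))]

lemma noMem_repl1 (k v : List Char) (hv : 'つ' ∉ v) :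
    ∀ (n : Nat) (y : List Char), y.length ≤ n → 'つ' ∉ y → 'つ' ∉ repl1 k v y := by
  intro n
  induction n with
  | zero =>
    intro y hlen hy
    have hnil : y = [] := List.length_eq_zero_iff.mp (Nat.le_zero.mp hlen)
    subst hnil
    simp [repl1]
  | succ n ih =>
    intro y hlen hy
    cases y with
    | nil => simp [repl1]
    | cons c t =>
      by_cases hpre : k.isPrefixOf (c :: t) = true
      · rw [repl1, if_pos hpre]
        intro hmem
        rcases List.mem_append.mp hmem with h | h
        · exact hv h
        · refine absurd h (ih _ ?_ ?_)
          · simp only [List.length_drop]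
            simp only [List.length_cons] at hlen
            omega
          · exact fun hm => hy (List.mem_cons_of_mem _ (List.mem_of_mem_drop hm))
      · rw [repl1, if_neg hpre]
        intro hmem
        rcases List.mem_cons.mp hmem with h | h
        · exact hy (h ▸ List.mem_cons_self)
        · exact absurd h (ih t (by simp only [List.length_cons] at hlen; omega)
            (fun hm => hy (List.mem_cons_of_mem _ hm)))

lemma ascii_infix_of_append {p : List Char} (hp : p ≠ []) (hpa : p.all isA = true) :
    ∀ a b : List Char, a.all (fun c => !isA c) = true → p <:+: a ++ b → p <:+: b := by
  intro a
  induction a with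
  | nil => intro b _ h; simpa using h
  | cons d a' ih =>
    intro b hna h
    simp only [List.all_cons, Bool.and_eq_true, Bool.not_eq_true'] at hna
    rcases List.infix_cons_iff.mp (by simpa using h) with hpre | hinf
    · exfalso
      obtain ⟨ph, pt, rfl⟩ := List.exists_cons_of_ne_nil hp
      obtain ⟨heq, -⟩ := List.cons_prefix_cons.mp hpre
      simp only [List.all_cons, Bool.and_eq_true] at hpa
      rw [heq, hna.1] at hpa
      exact Bool.false_ne_true hpa.1
    · exact ih b hna.2 hinf

lemma infix_of_infix_drop {p y : List Char} {j : Nat} (h : p <:+: List.drop j y) : p <:+: y :=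
  h.trans (List.drop_suffix _ _).isInfix

lemma infix_of_infix_tail {p : List Char} {c : Char} {t : List Char} (h : p <:+: t) :
    p <:+: c :: t :=
  h.trans (List.suffix_cons c t).isInfix

lemma noSu_repl1 (k v : List Char) (hvne : v ≠ []) (hva : v.all (fun c => !isA c) = true) :
    ∀ (n : Nat) (y : List Char), y.length ≤ n → ¬ ['s', 'u'] <:+: y →
      ¬ ['s', 'u'] <:+: repl1 k v y := by
  intro n
  induction n with
  | zero =>
    intro y hlen hy
    have hnil : y = [] := List.length_eq_zero_iff.mp (Nat.le_zero.mp hlen)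
    subst hnil
    simp [repl1, List.infix_nil]
  | succ n ih =>
    intro y hlen hy
    cases y with
    | nil => simp [repl1, List.infix_nil]
    | cons c t =>
      by_cases hpre : k.isPrefixOf (c :: t) = true
      · rw [repl1, if_pos hpre]
        intro h
        have h2 := ascii_infix_of_append (by simp) (by decide) v _ hva h
        refine ih _ ?_ ?_ h2
        · simp only [List.length_drop]
          simp only [List.length_cons] at hlen
          omega
        · exact fun hm => hy (infix_of_infix_tail (infix_of_infix_drop hm))
      · rw [repl1, if_neg hpre]
        intro h
        rcases List.infix_cons_iff.mp h with hpre2 | hinf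
        · obtain ⟨heq, hrest⟩ := List.cons_prefix_cons.mp hpre2
          cases t with
          | nil => simp [repl1, List.prefix_nil] at hrest
          | cons d t' =>
            by_cases hp2 : k.isPrefixOf (d :: t') = true
            · rw [repl1, if_pos hp2] at hrest
              obtain ⟨vh, vt, rfl⟩ := List.exists_cons_of_ne_nil hvne
              have hequ : 'u' = vh := by simpa using hrest
              simp only [List.all_cons, Bool.and_eq_true, Bool.not_eq_true'] at hva
              rw [← hequ] at hva
              exact absurd hva.1 (by decide)
            · rw [repl1, if_neg hp2] at hrest
              obtain ⟨hequ, -⟩ := List.cons_prefix_cons.mp hrest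
              apply hy
              rw [← heq, ← hequ]
              exact List.IsPrefix.isInfix
                (List.cons_prefix_cons.mpr ⟨rfl, List.cons_prefix_cons.mpr ⟨rfl, List.nil_prefix⟩⟩)
        · exact absurd hinf (ih t (by simp only [List.length_cons] at hlen; omega)
            (fun hm => hy (infix_of_infix_tail hm)))

lemma noSu_after (v : List Char) (hvne : v ≠ []) (hva : v.all (fun c => !isA c) = true) :
    ∀ (n : Nat) (y : List Char), y.length ≤ n → ¬ ['s', 'u'] <:+: repl1 ['s', 'u'] v y := by
  intro n
  induction n with
  | zero =>
    intro y hlen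
    have hnil : y = [] := List.length_eq_zero_iff.mp (Nat.le_zero.mp hlen)
    subst hnil
    simp [repl1, List.infix_nil]
  | succ n ih =>
    intro y hlen
    cases y with
    | nil => simp [repl1, List.infix_nil]
    | cons c t =>
      by_cases hpre : (['s', 'u'] : List Char).isPrefixOf (c :: t) = true
      · rw [repl1, if_pos hpre]
        intro h
        have h2 := ascii_infix_of_append (by simp) (by decide) v _ hva h
        refine ih _ ?_ h2
        simp only [List.length_drop]
        simp only [List.length_cons] at hlen
        omega
      · rw [repl1, if_neg hpre]
        intro h
        rcases List.infix_cons_iff.mp h with hpre2 | hinf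
        · obtain ⟨heq, hrest⟩ := List.cons_prefix_cons.mp hpre2
          cases t with
          | nil => simp [repl1, List.prefix_nil] at hrest
          | cons d t' =>
            by_cases hp2 : (['s', 'u'] : List Char).isPrefixOf (d :: t') = true
            · rw [repl1, if_pos hp2] at hrest
              obtain ⟨vh, vt, rfl⟩ := List.exists_cons_of_ne_nil hvne
              have hequ : 'u' = vh := by simpa using hrest
              simp only [List.all_cons, Bool.and_eq_true, Bool.not_eq_true'] at hva
              rw [← hequ] at hva
              exact absurd hva.1 (by decide)
            · rw [repl1, if_neg hp2] at hrest
              obtain ⟨hequ, -⟩ := List.cons_prefix_cons.mp hrest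
              apply hpre
              rw [← heq, ← hequ]
              exact List.isPrefixOf_iff_prefix.mpr
                (List.cons_prefix_cons.mpr ⟨rfl, List.cons_prefix_cons.mpr ⟨rfl, List.nil_prefix⟩⟩)
        · exact absurd hinf (ih t (by simp only [List.length_cons] at hlen; omega))

lemma chain_append (l1 l2 : List (List Char × List Char)) (x : List Char) :
    chain (l1 ++ l2) x = chain l2 (chain l1 x) :=
  List.foldl_append

lemma chain_cons (kv : List Char × List Char) (ks : List (List Char × List Char)) (x : List Char) :
    chain (kv :: ks) x = chain ks (repl1 kv.1 kv.2 x) := rfl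

lemma chain_noTsu : ∀ ks : List (List Char × List Char), (∀ kv ∈ ks, 'つ' ∉ kv.2) →
    ∀ y, 'つ' ∉ y → 'つ' ∉ chain ks y := by
  intro ks
  induction ks with
  | nil => intro _ y hy; exact hy
  | cons kv ks ih =>
    intro hks y hy
    rw [chain_cons]
    exact ih (fun kv' h' => hks kv' (List.mem_cons_of_mem _ h'))
      _ (noMem_repl1 kv.1 kv.2 (hks kv List.mem_cons_self) y.length y le_rfl hy)

lemma chain_noSu : ∀ ks : List (List Char × List Char), (∀ kv ∈ ks, kv ∈ keyListC) →
    ∀ y, ¬ ['s', 'u'] <:+: y → ¬ ['s', 'u'] <:+: chain ks y := by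
  intro ks
  induction ks with
  | nil => intro _ y hy; exact hy
  | cons kv ks ih =>
    intro hks y hy
    rw [chain_cons]
    have hm : kv ∈ keyListC := hks kv List.mem_cons_self
    have hm' : (kv.1, kv.2) ∈ keyListC := by simpa using hm
    exact ih (fun kv' h' => hks kv' (List.mem_cons_of_mem _ h')) _
      (noSu_repl1 kv.1 kv.2 (val_ne_nil hm') (val_nonascii hm') y.length y le_rfl hy)

lemma noTsuSeg_of_all {ks : List (List Char × List Char)}
    (hB : ks.all (fun kv => !(kv.2.contains 'つ')) = true) :
    ∀ kv ∈ ks, 'つ' ∉ kv.2 := by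
  intro kv hkv hm
  have h := List.all_eq_true.mp hB kv hkv
  simp only [Bool.not_eq_true'] at h
  have h2 := List.contains_iff_mem.mpr hm
  rw [h] at h2
  exact Bool.false_ne_true h2

lemma kA1_noTsu : ∀ kv ∈ keyListC.take 43, 'つ' ∉ kv.2 :=
  noTsuSeg_of_all (by decide)
lemma kA2_noTsu : ∀ kv ∈ (keyListC.drop 44).take 4, 'つ' ∉ kv.2 :=
  noTsuSeg_of_all (by decide)
lemma kA3_noTsu : ∀ kv ∈ keyListC.drop 49, 'つ' ∉ kv.2 :=
  noTsuSeg_of_all (by decide)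

lemma kA2_mem : ∀ kv ∈ (keyListC.drop 44).take 4, kv ∈ keyListC := by
  intro kv hkv
  rw [keySplit]
  exact List.mem_append_right _ (List.mem_cons_of_mem _ (List.mem_append_left _ hkv))

-- A's output never contains 'つ' when the input does not
lemma chain_no_tsu_char (s : List Char) (hs : 'つ' ∉ s) : 'つ' ∉ chain keyListC s := by
  rw [keySplit, chain_append, chain_cons, chain_append, chain_cons]
  have h1 : 'つ' ∉ chain (keyListC.take 43) s := chain_noTsu _ kA1_noTsu s hs
  set y1 := repl1 ['s', 'u'] ['す'] (chain (keyListC.take 43) s) with hy1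
  have h2su : ¬ ['s', 'u'] <:+: y1 := noSu_after ['す'] (by decide) (by decide) _ _ le_rfl
  have h2tsu : 'つ' ∉ y1 := noMem_repl1 _ _ (by decide) _ _ le_rfl h1
  set y2 := chain ((keyListC.drop 44).take 4) y1 with hy2
  have h3su : ¬ ['s', 'u'] <:+: y2 := chain_noSu _ kA2_mem _ h2su
  have h3tsu : 'つ' ∉ y2 := chain_noTsu _ kA2_noTsu _ h2tsu
  have h4 : repl1 ['t', 's', 'u'] ['つ'] y2 = y2 := by
    apply repl1_id
    intro j hc
    apply h3su
    have heq := List.prefix_iff_eq_append.mp hc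
    have h5 : ['s', 'u'] <+: List.drop (j + 1) y2 := by
      rw [← List.drop_drop (j := j) (i := 1), ← heq]
      simp
    exact infix_of_infix_drop h5.isInfix
  rw [h4]
  exact chain_noTsu _ kA3_noTsu _ h3tsu

-- ===== VERDICT (by name: the statement is the Claim_ definition above) =====
theorem convert_romaji_to_hiragana_spec : Claim_unchanged_convert_romaji_to_hiragana := by
  intro romaji _ hnd
  have hfree : ¬ (['t', 's', 'u'] <:+: romaji.toList) := by
    intro h
    apply hnd
    unfold D_convert_romaji_to_hiragana
    rw [PySem.Str.isIn_iff_infix]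
    simpa using h
  have h1 := portA_toList romaji
  have h2 : chain keyListC romaji.toList = scanGo romaji.toList.length romaji.toList :=
    chain_scan _ _ le_rfl hfree
  calc convert_romaji_to_hiragana romaji
      = String.ofList (convert_romaji_to_hiragana romaji).toList := (String.ofList_toList (s := convert_romaji_to_hiragana romaji)).symm
    _ = convert_romaji_to_hiragana_alt romaji := by rw [h1, h2]; rfl

theorem convert_romaji_to_hiragana_changed : Claim_changed_convert_romaji_to_hiragana := by
  unfold Claim_changed_convert_romaji_to_hiragana; decide

theorem convert_romaji_to_hiragana_tight : Claim_exact_convert_romaji_to_hiragana := by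
  intro romaji hdom hD heq
  have hinf : ['t', 's', 'u'] <:+: romaji.toList := by
    have h := (PySem.Str.isIn_iff_infix _ _).mp hD
    simpa using h
  have hna : 'つ' ∉ romaji.toList := by
    intro hm
    have h := List.all_eq_true.mp hdom _ hm
    exact absurd h (by decide)
  have hA : 'つ' ∉ (convert_romaji_to_hiragana romaji).toList := by
    rw [portA_toList]
    exact chain_no_tsu_char _ hna
  have hB : 'つ' ∈ (convert_romaji_to_hiragana_alt romaji).toList := by
    unfold convert_romaji_to_hiragana_alt
    rw [String.toList_ofList]
    exact scan_has_tsu _ _ le_rfl hinf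
  rw [heq] at hA
  exact hA hB
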